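-- pv_equiv track=rewrite | github.com/lishaogang/practice | derivate/panel.py | inputWrapper
-- ===== SOURCE A (Python) =====
-- def inputWrapper(s,n):
-- 	r = ''
-- 	for i in s:
-- 		r += i
-- 		if i in ['(',')']:
-- 			r += i
--
-- 	try:
-- 		n = int(n)
-- 		if n < 0:
-- 			return None,None
-- 	except:
-- 		return None,None
--
-- 	return r+'#',n
-- ===== SOURCE B (Python) =====
-- def inputWrapper(s, n):
--     try:
--         n = int(n)
--     except:
--         return None, None
--     if n < 0:
--         return None, None
--     return s.replace('(', '((').replace(')', '))') + '#', n
-- ===== Notes on version B (the rewrite author's own statement) =====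
-- stated objective: faster
-- what changed: Replaces the character-by-character accumulation loop (append each char, append again if it is a parenthesis) with two chained str.replace passes ('('->'((' then ')'->'))') and moves the int-validation before the string work.
import Mathlib
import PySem

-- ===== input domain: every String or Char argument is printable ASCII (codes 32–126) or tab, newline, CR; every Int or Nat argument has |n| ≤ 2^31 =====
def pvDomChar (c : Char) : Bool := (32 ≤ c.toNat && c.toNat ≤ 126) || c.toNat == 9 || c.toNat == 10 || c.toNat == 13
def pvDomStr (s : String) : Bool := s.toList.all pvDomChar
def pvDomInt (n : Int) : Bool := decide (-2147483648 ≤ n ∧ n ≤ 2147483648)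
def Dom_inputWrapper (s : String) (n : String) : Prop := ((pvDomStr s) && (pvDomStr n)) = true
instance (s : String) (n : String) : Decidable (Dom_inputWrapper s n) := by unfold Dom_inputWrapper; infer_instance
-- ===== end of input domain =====

-- B replaces A's per-character accumulation loop with two chained str.replace passes (idiomatic); same values everywhere.

-- ===== PORT A =====
-- loop: r = ''; for i in s: r += i; if i in ['(',')']: r += i
def inputWrapperLoop (cs : List Char) : List Char :=
  cs.foldl (fun r i =>
    let r := r ++ [i]
    if i ∈ ['(', ')'] then r ++ [i] else r) []

def inputWrapper (s : String) (n : String) : Option String × Option Int :=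
  let r := inputWrapperLoop s.toList
  match PySem.Int.ofStr? n with
  | none => (none, none)
  | some m => if m < 0 then (none, none) else (some (String.ofList (r ++ ['#'])), some m)

-- ===== PORT B =====
def inputWrapper_alt (s : String) (n : String) : Option String × Option Int :=
  match PySem.Int.ofStr? n with
  | none => (none, none)
  | some m =>
    if m < 0 then (none, none)
    else (some ((PySem.Str.replace (PySem.Str.replace s "(" "((") ")" "))") ++ "#"), some m)

-- ===== PRECONDITION & SPEC =====
def Spec_inputWrapper (s : String) (n : String) (out : Option String × Option Int) : Prop := out = inputWrapper_alt s n
instance (s : String) (n : String) (out : Option String × Option Int) : Decidable (Spec_inputWrapper s n out) := by unfold Spec_inputWrapper; infer_instance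

-- ===== CLAIM (what is proved, stated in full; the proofs are below) =====
def Claim_equal_inputWrapper : Prop := ∀ (s : String) (n : String), Dom_inputWrapper s n → Spec_inputWrapper s n (inputWrapper s n)

-- ===== LEMMAS AND PROOFS =====

-- per-character doubling, as one flatMap
def pvDouble (p : Char) (c : Char) : List Char := if c = p then [p, p] else [c]

theorem replace_go_single (p : Char) (l acc : List Char) :
    PySem.Chars.replace.go [p] [p, p] l.length l acc
      = acc.reverse ++ l.flatMap (pvDouble p) := by
  induction l generalizing acc with
  | nil => simp [PySem.Chars.replace.go]
  | cons c t ih =>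
    by_cases h : p = c
    · subst h
      rw [show (p :: t).length = t.length + 1 from rfl, PySem.Chars.replace.go]
      have hp : [p].isPrefixOf (p :: t) = true := by simp [List.isPrefixOf]
      rw [hp]
      simp only [if_true, List.length_cons, List.length_nil, List.drop_succ_cons, List.drop_zero]
      rw [ih ([p, p].reverse ++ acc)]
      simp [pvDouble]
    · rw [show (c :: t).length = t.length + 1 from rfl, PySem.Chars.replace.go]
      have hb : ([p].isPrefixOf (c :: t)) = false := by
        simp [List.isPrefixOf, h]
      rw [hb]
      simp only [Bool.false_eq_true, if_false]
      rw [ih (c :: acc)]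
      have hc : ¬ c = p := fun e => h e.symm
      simp [pvDouble, hc]

theorem replace_single (p : Char) (l : List Char) :
    PySem.Chars.replace l [p] [p, p] = l.flatMap (pvDouble p) := by
  simpa [PySem.Chars.replace] using replace_go_single p l []

theorem loop_eq_flatMap (cs acc : List Char) :
    cs.foldl (fun r i =>
      let r := r ++ [i]
      if i ∈ ['(', ')'] then r ++ [i] else r) acc
      = acc ++ (cs.flatMap (pvDouble '(')).flatMap (pvDouble ')') := by
  induction cs generalizing acc with
  | nil => simp
  | cons c t ih =>
    rw [List.foldl_cons, ih]
    by_cases h1 : c = '('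
    · subst h1; simp [pvDouble]
    · by_cases h2 : c = ')'
      · subst h2; simp [pvDouble]
      · simp [pvDouble, h1, h2]

theorem loop_eq_replaces (s : String) :
    inputWrapperLoop s.toList
      = (PySem.Str.replace (PySem.Str.replace s "(" "((") ")" "))").toList := by
  unfold inputWrapperLoop
  rw [loop_eq_flatMap]
  simp [PySem.Str.toList_replace, replace_single]

-- ===== VERDICT (by name: the statement is the Claim_ definition above) =====
theorem inputWrapper_spec : Claim_equal_inputWrapper := by
  intro s n _
  unfold Spec_inputWrapper inputWrapper inputWrapper_alt
  cases h : PySem.Int.ofStr? n with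
  | none => simp
  | some m =>
    by_cases hm : m < 0
    · simp [hm]
    · have hr := loop_eq_replaces s
      simp only [hm, if_false]
      refine Prod.ext ?_ rfl
      simp only [Option.some.injEq]
      apply String.ext
      simp [hr]
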